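-- pv_equiv track=rewrite | github.com/Poornima-Bhupanagouda/Agent-Eval-MVP-main | agent_eval/core/test_templates.py | suggest_templates
-- ===== SOURCE A (Python) =====
-- from typing import List, Dict, Optional
--
-- def suggest_templates(agent_type: str) -> List[str]:
--     """
--     Suggest template packs based on agent type.
--
--     Args:
--         agent_type: "rag", "conversational", "tool_using", "simple", etc.
--
--     Returns:
--         List of recommended pack IDs
--     """
--     recommendations = []
--
--     # Always recommend general
--     recommendations.append("general_agent")
--
--     # Type-specific recommendations
--     type_map = {
--         "rag": ["rag_starter", "safety_suite"],
--         "conversational": ["conversation_flow", "safety_suite"],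
--         "tool_using": ["tool_use_validation", "orchestrator_chain", "safety_suite"],
--         "orchestrator": ["orchestrator_chain", "tool_use_validation", "safety_suite"],
--         "simple": ["safety_suite", "performance_sla"],
--     }
--
--     for pack_id in type_map.get(agent_type, []):
--         if pack_id not in recommendations:
--             recommendations.append(pack_id)
--
--     # Always recommend safety
--     if "safety_suite" not in recommendations:
--         recommendations.append("safety_suite")
--
--     return recommendations
-- ===== SOURCE B (Python) =====
-- # The full recommendation list for each agent type is fixed, so precompute it:
-- # a single lookup replaces all list building and deduplication.
-- _RESULT_MAP = {
--     "rag": ["general_agent", "rag_starter", "safety_suite"],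
--     "conversational": ["general_agent", "conversation_flow", "safety_suite"],
--     "tool_using": ["general_agent", "tool_use_validation", "orchestrator_chain", "safety_suite"],
--     "orchestrator": ["general_agent", "orchestrator_chain", "tool_use_validation", "safety_suite"],
--     "simple": ["general_agent", "safety_suite", "performance_sla"],
-- }
--
-- def suggest_templates(agent_type: str) -> list:
--     return list(_RESULT_MAP.get(agent_type, ["general_agent", "safety_suite"]))
-- ===== Notes on version B (the rewrite author's own statement) =====
-- stated objective: simpler
-- what changed: B precomputes the finished recommendation list per agent type and returns a single table lookup (with a fixed default), eliminating A's incremental building, in-loop membership checks and the trailing safety guard.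
import Mathlib
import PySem

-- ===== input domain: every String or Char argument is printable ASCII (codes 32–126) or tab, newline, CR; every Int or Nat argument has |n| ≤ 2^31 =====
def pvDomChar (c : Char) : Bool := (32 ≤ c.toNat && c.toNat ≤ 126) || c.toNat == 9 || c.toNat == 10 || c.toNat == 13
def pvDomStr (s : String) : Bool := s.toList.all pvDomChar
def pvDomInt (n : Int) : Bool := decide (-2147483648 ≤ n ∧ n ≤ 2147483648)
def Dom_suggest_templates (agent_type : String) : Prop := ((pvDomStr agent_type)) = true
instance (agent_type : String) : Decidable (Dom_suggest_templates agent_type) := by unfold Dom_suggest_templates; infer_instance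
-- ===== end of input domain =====

-- B replaces A's incremental guarded building with a lookup of precomputed final lists; objective: simpler.
-- ===== PORT A =====
def pvTypeMap : PySem.Dict String (List String) :=
  PySem.Dict.mk [
    ("rag", ["rag_starter", "safety_suite"]),
    ("conversational", ["conversation_flow", "safety_suite"]),
    ("tool_using", ["tool_use_validation", "orchestrator_chain", "safety_suite"]),
    ("orchestrator", ["orchestrator_chain", "tool_use_validation", "safety_suite"]),
    ("simple", ["safety_suite", "performance_sla"])]

-- guarded incremental building, as in A: append each pack only if absent, then the trailing safety guard
def suggest_templates (agent_type : String) : List String :=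
  let recommendations : List String := ["general_agent"]
  let recommendations :=
    (pvTypeMap.getD agent_type []).foldl
      (fun recs pack_id => if pack_id ∈ recs then recs else recs ++ [pack_id]) recommendations
  if "safety_suite" ∈ recommendations then recommendations
  else recommendations ++ ["safety_suite"]

-- ===== PORT B =====
-- precomputed finished lists; one lookup with a fixed default
def pvResultMap : PySem.Dict String (List String) :=
  PySem.Dict.mk [
    ("rag", ["general_agent", "rag_starter", "safety_suite"]),
    ("conversational", ["general_agent", "conversation_flow", "safety_suite"]),
    ("tool_using", ["general_agent", "tool_use_validation", "orchestrator_chain", "safety_suite"]),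
    ("orchestrator", ["general_agent", "orchestrator_chain", "tool_use_validation", "safety_suite"]),
    ("simple", ["general_agent", "safety_suite", "performance_sla"])]

def suggest_templates_alt (agent_type : String) : List String :=
  pvResultMap.getD agent_type ["general_agent", "safety_suite"]

-- ===== PRECONDITION & SPEC =====
def Spec_suggest_templates (agent_type : String) (out : List String) : Prop := out = suggest_templates_alt agent_type
instance (agent_type : String) (out : List String) : Decidable (Spec_suggest_templates agent_type out) := by unfold Spec_suggest_templates; infer_instance

-- ===== CLAIM (what is proved, stated in full; the proofs are below) =====
def Claim_equal_suggest_templates : Prop := ∀ (agent_type : String), Dom_suggest_templates agent_type → Spec_suggest_templates agent_type (suggest_templates agent_type)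

-- ===== LEMMAS AND PROOFS =====

-- ===== VERDICT (by name: the statement is the Claim_ definition above) =====
theorem suggest_templates_spec : Claim_equal_suggest_templates := by
  intro s _
  unfold Spec_suggest_templates
  by_cases h1 : s = "rag"; · subst h1; decide
  by_cases h2 : s = "conversational"; · subst h2; decide
  by_cases h3 : s = "tool_using"; · subst h3; decide
  by_cases h4 : s = "orchestrator"; · subst h4; decide
  by_cases h5 : s = "simple"; · subst h5; decide
  have hA : pvTypeMap.getD s [] = [] := by
    simp [pvTypeMap, PySem.Dict.getD, PySem.Dict.get?, beq_iff_eq,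
      Ne.symm h1, Ne.symm h2, Ne.symm h3, Ne.symm h4, Ne.symm h5]
  have hB : pvResultMap.getD s ["general_agent", "safety_suite"] = ["general_agent", "safety_suite"] := by
    simp [pvResultMap, PySem.Dict.getD, PySem.Dict.get?, beq_iff_eq,
      Ne.symm h1, Ne.symm h2, Ne.symm h3, Ne.symm h4, Ne.symm h5]
  simp [suggest_templates, suggest_templates_alt, hA, hB]
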